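-- pv_equiv track=rewrite | github.com/li-group/scChat | rnasc/lib/python3.10/site-packages/jax/_src/numpy/lax_numpy.py | _triu_size
-- ===== SOURCE A (Python) =====
-- def _triu_size(n, m, k):
--   if k < 0:
--     return n * m - _triu_size(m, n, (1 - k))
--   elif k >= m:
--     return 0
--   else:
--     mk = min(n, m - k)
--     return mk * (mk + 1) // 2 + mk * (m - k - mk)
-- ===== SOURCE B (Python) =====
-- def _triu_size(n, m, k):
--     # count = sum over rows i of clamp(m - k - i, 0, m), computed as a
--     # difference of prefix sums g(y) = sum_{x <= y} clamp(x, 0, m)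
--     def g(y):
--         if y <= 0:
--             return 0
--         if y <= m:
--             return y * (y + 1) // 2
--         return m * (m + 1) // 2 + m * (y - m)
--     return g(m - k) - g(m - k - n)
-- ===== Notes on version B (the rewrite author's own statement) =====
-- stated objective: simpler
-- what changed: Replaces the recursive three-branch closed-form (negative-k complement recursion plus a min/Gauss formula) by a direct difference of two clamped prefix sums g(m-k) - g(m-k-n), where g(y) sums the per-row column count clamp(x,0,m) for x <= y.
-- outside the precondition, e.g. on _triu_size(-2, 5, 0): A returns -13, B returns -10; on _triu_size(3, -4, -1): A returns 2, B returns 0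
import Mathlib
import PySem

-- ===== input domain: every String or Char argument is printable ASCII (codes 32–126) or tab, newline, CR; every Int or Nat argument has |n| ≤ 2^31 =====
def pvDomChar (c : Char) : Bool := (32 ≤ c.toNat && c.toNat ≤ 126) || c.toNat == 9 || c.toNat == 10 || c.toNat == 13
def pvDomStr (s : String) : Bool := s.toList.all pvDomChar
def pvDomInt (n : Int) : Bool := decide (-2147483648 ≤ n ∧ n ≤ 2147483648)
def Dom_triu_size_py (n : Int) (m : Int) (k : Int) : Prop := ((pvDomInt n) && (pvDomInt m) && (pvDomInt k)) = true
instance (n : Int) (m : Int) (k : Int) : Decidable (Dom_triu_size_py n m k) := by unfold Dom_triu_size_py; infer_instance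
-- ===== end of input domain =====

-- B replaces A's recursive three-branch closed-form by a difference of two clamped prefix sums (no recursion, no complement trick).

-- ===== PORT A =====
def triu_size_py (n : Int) (m : Int) (k : Int) : Int :=
  if k < 0 then
    n * m - triu_size_py m n (1 - k)
  else if k ≥ m then
    0
  else
    let mk := min n (m - k)
    PySem.Int.floordiv (mk * (mk + 1)) 2 + mk * (m - k - mk)
termination_by (if k < 0 then 1 else 0 : Nat)
decreasing_by split_ifs <;> omega

-- ===== PORT B =====
-- helper g of B: prefix sum of the clamped column count clamp(x, 0, m)
def triu_size_py_g (m : Int) (y : Int) : Int :=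
  if y ≤ 0 then 0
  else if y ≤ m then PySem.Int.floordiv (y * (y + 1)) 2
  else PySem.Int.floordiv (m * (m + 1)) 2 + m * (y - m)

def triu_size_py_alt (n : Int) (m : Int) (k : Int) : Int :=
  triu_size_py_g m (m - k) - triu_size_py_g m (m - k - n)

-- ===== PRECONDITION & SPEC =====
-- Pre_ restricts to nonnegative dimensions n, m — the natural domain of a matrix-shape count;
-- for negative n or m A still returns a value, but it is a meaningless (possibly negative) "count"
-- that is an accident of its formula, and B's formula is free there too.
def Pre_triu_size_py (n : Int) (m : Int) (k : Int) : Prop := 0 ≤ n ∧ 0 ≤ m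
instance (n : Int) (m : Int) (k : Int) : Decidable (Pre_triu_size_py n m k) := by unfold Pre_triu_size_py; infer_instance
def pvWitness_triu_size_py : Int × Int × Int := (3, 4, 1)

def Spec_triu_size_py (n : Int) (m : Int) (k : Int) (out : Int) : Prop := out = triu_size_py_alt n m k
instance (n : Int) (m : Int) (k : Int) (out : Int) : Decidable (Spec_triu_size_py n m k out) := by unfold Spec_triu_size_py; infer_instance

-- ===== CLAIM (what is proved, stated in full; the proofs are below) =====
def Claim_equal_triu_size_py : Prop := ∀ (n : Int) (m : Int) (k : Int), Dom_triu_size_py n m k → Pre_triu_size_py n m k → Spec_triu_size_py n m k (triu_size_py n m k)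

-- ===== LEMMAS AND PROOFS =====

-- doubling a floor-halved consecutive product recovers it (the product is even)
theorem pv_fd2 (a : Int) : 2 * PySem.Int.floordiv (a * (a + 1)) 2 = a * (a + 1) := by
  obtain ⟨c, hc⟩ := Int.even_mul_succ_self a
  rw [PySem.Int.floordiv_eq_ediv_of_pos (by omega)]
  omega

-- one step of B's prefix sum is one clamped column count
theorem pv_g_diff (m x : Int) (hm : 0 ≤ m) :
    triu_size_py_g m x - triu_size_py_g m (x - 1) = max 0 (min m x) := by
  unfold triu_size_py_g
  split_ifs with h1 h2 h3 h4 h5 h6 h7 h8 <;> try omega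
  · -- x = 1 ≤ m
    have hx : x = 1 := by omega
    subst hx
    rw [show PySem.Int.floordiv ((1 : Int) * (1 + 1)) 2 = 1 from by decide]
    omega
  · -- 2 ≤ x ≤ m : triangle difference
    have h1 := pv_fd2 x
    have h2 := pv_fd2 (x - 1)
    have hmx : min m x = x := by omega
    have hmax : max 0 x = x := by omega
    have hr : (x - 1) * (x - 1 + 1) + 2 * x = x * (x + 1) := by ring
    rw [hmx, hmax]
    linarith [h1, h2, hr]
  · -- x = 1, m = 0
    have hx : x = 1 := by omega
    have hm0 : m = 0 := by omega
    subst hx; subst hm0; decide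
  · -- x = m + 1 : top branch minus full triangle
    have hx : x = m + 1 := by omega
    subst hx
    have : max 0 (min m (m + 1)) = m := by omega
    rw [this]; ring
  · -- x > m + 1 : rectangle difference
    have hr : m * (x - m) - m * (x - 1 - m) = m := by ring
    have : max 0 (min m x) = m := by omega
    rw [this]
    linarith [hr]

-- B as a sum over the rows 0..N-1 (telescoping the prefix-sum difference)
theorem pv_alt_sum (N : Nat) (m k : Int) (hm : 0 ≤ m) :
    triu_size_py_alt N m k
      = ((List.range N).map (fun i : Nat => max 0 (m - max 0 ((i : Int) + k)))).sum := by
  induction N with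
  | zero => simp [triu_size_py_alt]
  | succ N ih =>
    have hcast : ((N + 1 : Nat) : Int) = (N : Int) + 1 := by push_cast; ring
    rw [List.range_succ, List.map_append, List.sum_append, ← ih, hcast]
    unfold triu_size_py_alt
    have hd := pv_g_diff m (m - k - N) hm
    have hterm : max 0 (min m (m - k - (N : Int))) = max 0 (m - max 0 ((N : Int) + k)) := by omega
    have harg : m - k - ((N : Int) + 1) = (m - k - N) - 1 := by ring
    rw [harg]
    simp only [List.map_cons, List.map_nil, List.sum_cons, List.sum_nil]
    omega

-- adding one row to A's closed form adds exactly that row's column count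
theorem pv_step (n m k : Int) (hn : 0 ≤ n) (hm : 0 ≤ m) :
    triu_size_py (n + 1) m k = triu_size_py n m k + max 0 (m - max 0 (n + k)) := by
  rw [triu_size_py.eq_def, triu_size_py.eq_def (n := n)]
  by_cases hk : k < 0
  · -- negative offset: both sides go through the complement
    simp only [if_pos hk]
    rw [triu_size_py.eq_def (n := m) (m := n + 1), triu_size_py.eq_def (n := m) (m := n)]
    have h1 : ¬ (1 - k < 0) := by omega
    simp only [if_neg h1]
    by_cases hb : 1 - k ≥ n + 1
    · have hb2 : 1 - k ≥ n := by omega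
      simp only [if_pos hb, if_pos hb2]
      have : max 0 (n + k) = 0 := by omega
      rw [this]
      have : max 0 (m - 0) = m := by omega
      rw [this]; ring
    · by_cases hb2 : 1 - k ≥ n
      · -- 1 - k = n, i.e. n + k = 1
        have hnk : n + k = 1 := by omega
        simp only [if_neg hb, if_pos hb2]
        have he : min m (n + 1 - (1 - k)) = min m 1 := by omega
        rw [he]
        by_cases hm0 : m = 0
        · subst hm0; norm_num
        · have : min m 1 = 1 := by omega
          rw [this]
          have : max 0 (n + k) = 1 := by omega
          rw [this]
          have h2 : PySem.Int.floordiv (1 * (1 + 1)) 2 = 1 := by decide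
          rw [h2]
          have : max 0 (m - 1) = m - 1 := by omega
          rw [this]; ring_nf; omega
      · -- n + k ≥ 2 : both inner formulas fire
        simp only [if_neg hb, if_neg hb2]
        have e1 : min m (n + 1 - (1 - k)) = min m (n + k) := by omega
        have e2 : min m (n - (1 - k)) = min m (n + k - 1) := by omega
        rw [e1, e2]
        by_cases hc : m ≤ n + k - 1
        · have f1 : min m (n + k) = m := by omega
          have f2 : min m (n + k - 1) = m := by omega
          rw [f1, f2]
          have : max 0 (n + k) = n + k := by omega
          rw [this]
          have : max 0 (m - (n + k)) = 0 := by omega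
          rw [this]; ring
        · have f1 : min m (n + k) = n + k := by omega
          have f2 : min m (n + k - 1) = n + k - 1 := by omega
          rw [f1, f2]
          have : max 0 (n + k) = n + k := by omega
          rw [this]
          have : max 0 (m - (n + k)) = m - (n + k) := by omega
          rw [this]
          have h1 := pv_fd2 (n + k)
          have h2 := pv_fd2 (n + k - 1)
          have hr : (n + k - 1) * (n + k - 1 + 1) + 2 * (n + k)
              = (n + k) * (n + k + 1) := by ring
          nlinarith [h1, h2, hr]
  · simp only [if_neg hk]
    by_cases hkm : k ≥ m
    · simp only [if_pos hkm]
      have : max 0 (n + k) = n + k := by omega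
      rw [this]
      have : max 0 (m - (n + k)) = 0 := by omega
      rw [this]; ring
    · simp only [if_neg hkm]
      by_cases hc : m - k ≤ n
      · have f1 : min (n + 1) (m - k) = m - k := by omega
        have f2 : min n (m - k) = m - k := by omega
        rw [f1, f2]
        have : max 0 (n + k) = n + k := by omega
        rw [this]
        have : max 0 (m - (n + k)) = 0 := by omega
        rw [this]; ring
      · have f1 : min (n + 1) (m - k) = n + 1 := by omega
        have f2 : min n (m - k) = n := by omega
        rw [f1, f2]
        have : max 0 (n + k) = n + k := by omega
        rw [this]
        have : max 0 (m - (n + k)) = m - (n + k) := by omega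
        rw [this]
        have h1 := pv_fd2 (n + 1)
        have h2 := pv_fd2 n
        have hr : n * (n + 1) + 2 * (n + 1) = (n + 1) * (n + 1 + 1) := by ring
        nlinarith [h1, h2, hr]

theorem pv_base (m k : Int) : triu_size_py 0 m k = 0 := by
  rw [triu_size_py.eq_def]
  by_cases hk : k < 0
  · simp only [if_pos hk]
    rw [triu_size_py.eq_def]
    have h1 : ¬ (1 - k < 0) := by omega
    have h2 : (1 - k ≥ (0 : Int)) := by omega
    simp only [if_neg h1, if_pos h2]; ring
  · simp only [if_neg hk]
    by_cases hkm : k ≥ m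
    · simp [if_pos hkm]
    · simp only [if_neg hkm]
      have : min (0 : Int) (m - k) = 0 := by omega
      rw [this]
      have h0 : PySem.Int.floordiv ((0 : Int) * (0 + 1)) 2 = 0 := by decide
      rw [h0]; ring

theorem pv_main (N : Nat) (m k : Int) (hm : 0 ≤ m) :
    triu_size_py N m k
      = ((List.range N).map (fun i : Nat => max 0 (m - max 0 ((i : Int) + k)))).sum := by
  induction N with
  | zero => simpa using pv_base m k
  | succ N ih =>
    have hcast : ((N + 1 : Nat) : Int) = (N : Int) + 1 := by push_cast; ring
    rw [hcast, pv_step (N : Int) m k (by positivity) hm, ih,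
      List.range_succ, List.map_append, List.sum_append]
    simp

-- ===== VERDICT (by name: the statement is the Claim_ definition above) =====
theorem triu_size_py_spec : Claim_equal_triu_size_py := by
  intro n m k _ hpre
  obtain ⟨hn, hm⟩ := hpre
  unfold Spec_triu_size_py
  have hcast : ((n.toNat : Nat) : Int) = n := by omega
  calc triu_size_py n m k = triu_size_py (n.toNat : Int) m k := by rw [hcast]
    _ = ((List.range n.toNat).map (fun i : Nat => max 0 (m - max 0 ((i : Int) + k)))).sum :=
        pv_main n.toNat m k hm
    _ = triu_size_py_alt (n.toNat : Int) m k := (pv_alt_sum n.toNat m k hm).symm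
    _ = triu_size_py_alt n m k := by rw [hcast]
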